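-- pv_equiv track=rewrite | github.com/arnab-007/Boolean-program-testing | Validifier/sampler_for_cmsgen.py | convert_sample
-- ===== SOURCE A (Python) =====
-- variable_mapping = {1: 'x1', 2: 'x2', 3: 'x3', 4: 'x4', 5: 'x5', 6: 'x6', 7: 'x7', 8: 'x8', 9: 'x9', 10: 'x10', 11: 'x11', 12: 'x12', 13: 'x13', 14: 'x14', 15: 'x15', 16: 'x16', 17: 'x17'}
--
-- def convert_sample(sample_line):
--     # Split the line into tokens
--     tokens = sample_line.split()
--     # Initialize an empty list to hold the formatted variables
--     formatted_vars = []
--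
--     for token in tokens:
--         num = int(token)
--         if num != 0:
--             if num > 0:
--                 var_name = variable_mapping.get(num)
--                 if var_name:
--                     formatted_vars.append(f"{var_name}")
--             else:
--                 var_name = variable_mapping.get(-num)
--                 if var_name:
--                     formatted_vars.append(f"!{var_name}")
--
--     return " && ".join(formatted_vars)
-- ===== SOURCE B (Python) =====
-- def convert_sample(sample_line):
--     # Recursive decomposition: classify each token with `term` (computed arithmetically,
--     # no lookup table), and build the result string front-to-back by recursion —
--     # no accumulator list and no join.
--     def term(num):
--         v = -num if num < 0 else num
--         if num == 0 or v > 17: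
--             return None
--         return ("!x" if num < 0 else "x") + str(v)
--
--     def go(tokens):
--         if not tokens:
--             return ""
--         head = term(int(tokens[0]))
--         rest = go(tokens[1:])
--         if head is None:
--             return rest
--         if rest == "":
--             return head
--         return head + " && " + rest
--
--     return go(sample_line.split())
-- ===== Notes on version B (the rewrite author's own statement) =====
-- stated objective: alternative
-- what changed: Replaces the table-lookup accumulate-into-a-list-then-join loop by a recursive function that classifies each token arithmetically (no 17-entry dict) and concatenates the result string directly front-to-back with no intermediate list and no join.
import Mathlib
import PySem

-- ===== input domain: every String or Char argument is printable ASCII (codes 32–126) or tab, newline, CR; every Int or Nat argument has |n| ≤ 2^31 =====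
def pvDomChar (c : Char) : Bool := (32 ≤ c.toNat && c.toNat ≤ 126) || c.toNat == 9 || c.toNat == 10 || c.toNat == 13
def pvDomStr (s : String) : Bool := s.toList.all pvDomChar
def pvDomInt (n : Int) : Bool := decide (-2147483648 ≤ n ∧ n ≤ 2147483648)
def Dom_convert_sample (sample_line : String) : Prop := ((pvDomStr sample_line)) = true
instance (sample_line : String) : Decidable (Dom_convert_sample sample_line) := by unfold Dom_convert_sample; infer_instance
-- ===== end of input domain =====

-- B replaces the list-accumulate-then-join loop over a 17-entry table by a recursive
-- function computing each name arithmetically and building the string directly, no intermediate list or join (objective: alternative).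

-- ===== PORT A =====
def variable_mapping : PySem.Dict Int String :=
  PySem.Dict.ofList [(1, "x1"), (2, "x2"), (3, "x3"), (4, "x4"), (5, "x5"), (6, "x6"),
    (7, "x7"), (8, "x8"), (9, "x9"), (10, "x10"), (11, "x11"), (12, "x12"), (13, "x13"),
    (14, "x14"), (15, "x15"), (16, "x16"), (17, "x17")]

def convert_sample (sample_line : String) : String :=
  let tokens := PySem.Str.split₀ sample_line
  let formatted_vars := tokens.foldl (fun acc token =>
    let num := (PySem.Int.ofStr? token).getD 0   -- int(token); Pre_ guarantees it parses
    if num ≠ 0 then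
      if num > 0 then
        match variable_mapping.get? num with
        | some var_name => acc ++ [var_name]
        | none => acc
      else
        match variable_mapping.get? (-num) with
        | some var_name => acc ++ ["!" ++ var_name]
        | none => acc
    else acc) []
  PySem.Str.join " && " formatted_vars

-- ===== PORT B =====
-- B's helper `term`: arithmetic classification of one parsed number.
def pvTerm (num : Int) : Option String :=
  let v := if num < 0 then -num else num
  if num = 0 ∨ v > 17 then none
  else some ((if num < 0 then "!x" else "x") ++ PySem.Int.toStr v)

-- B's helper `go`: recursion over the token list, building the string front-to-back.
def pvGo : List String → String
  | [] => ""
  | t :: tl =>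
    let head := pvTerm ((PySem.Int.ofStr? t).getD 0)   -- term(int(tokens[0])); Pre_ guarantees parse
    let rest := pvGo tl
    match head with
    | none => rest
    | some h => if rest = "" then h else h ++ " && " ++ rest

def convert_sample_alt (sample_line : String) : String :=
  pvGo (PySem.Str.split₀ sample_line)

-- ===== PRECONDITION & SPEC =====
-- Python's int(token) raises ValueError on a non-integer token; Pre_ excludes exactly those lines.
def Pre_convert_sample (sample_line : String) : Prop :=
  ∀ t ∈ PySem.Str.split₀ sample_line, (PySem.Int.ofStr? t).isSome
instance (sample_line : String) : Decidable (Pre_convert_sample sample_line) := by unfold Pre_convert_sample; infer_instance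
def pvWitness_convert_sample : String := "1 -2 0 18 -17"
def Spec_convert_sample (sample_line : String) (out : String) : Prop := out = convert_sample_alt sample_line
instance (sample_line : String) (out : String) : Decidable (Spec_convert_sample sample_line out) := by unfold Spec_convert_sample; infer_instance

-- ===== CLAIM (what is proved, stated in full; the proofs are below) =====
def Claim_equal_convert_sample : Prop := ∀ (sample_line : String), Dom_convert_sample sample_line → Pre_convert_sample sample_line → Spec_convert_sample sample_line (convert_sample sample_line)

-- ===== LEMMAS AND PROOFS =====

-- A's per-token contribution, as an Option.
def pvFA (num : Int) : Option String :=
  if num ≠ 0 then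
    if num > 0 then variable_mapping.get? num
    else (variable_mapping.get? (-num)).map (fun v => "!" ++ v)
  else none

-- pvTerm with its let zeta-reduced.
theorem pvTerm_def (num : Int) :
    pvTerm num =
      if num = 0 ∨ (if num < 0 then -num else num) > 17 then none
      else some ((if num < 0 then "!x" else "x") ++ PySem.Int.toStr (if num < 0 then -num else num)) := rfl

-- A's table lookup, characterised arithmetically.
set_option maxHeartbeats 1600000 in
theorem variable_mapping_get (n : Int) :
    variable_mapping.get? n = if 1 ≤ n ∧ n ≤ 17 then some ("x" ++ PySem.Int.toStr n) else none := by
  by_cases h : 1 ≤ n ∧ n ≤ 17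
  · obtain ⟨h1, h2⟩ := h
    interval_cases n <;> decide
  · rw [if_neg h]
    have hm : variable_mapping = PySem.Dict.mk [(1, "x1"), (2, "x2"), (3, "x3"), (4, "x4"),
        (5, "x5"), (6, "x6"), (7, "x7"), (8, "x8"), (9, "x9"), (10, "x10"), (11, "x11"),
        (12, "x12"), (13, "x13"), (14, "x14"), (15, "x15"), (16, "x16"), (17, "x17")] := rfl
    rw [hm]
    simp only [PySem.Dict.get?_mk_cons, beq_iff_eq]
    rw [if_neg (show ¬(1:Int) = n by omega)]
    rw [if_neg (show ¬(2:Int) = n by omega)]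
    rw [if_neg (show ¬(3:Int) = n by omega)]
    rw [if_neg (show ¬(4:Int) = n by omega)]
    rw [if_neg (show ¬(5:Int) = n by omega)]
    rw [if_neg (show ¬(6:Int) = n by omega)]
    rw [if_neg (show ¬(7:Int) = n by omega)]
    rw [if_neg (show ¬(8:Int) = n by omega)]
    rw [if_neg (show ¬(9:Int) = n by omega)]
    rw [if_neg (show ¬(10:Int) = n by omega)]
    rw [if_neg (show ¬(11:Int) = n by omega)]
    rw [if_neg (show ¬(12:Int) = n by omega)]
    rw [if_neg (show ¬(13:Int) = n by omega)]
    rw [if_neg (show ¬(14:Int) = n by omega)]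
    rw [if_neg (show ¬(15:Int) = n by omega)]
    rw [if_neg (show ¬(16:Int) = n by omega)]
    rw [if_neg (show ¬(17:Int) = n by omega)]
    rfl

-- A's contribution equals B's arithmetic classification.
theorem pvFA_eq_term (num : Int) : pvFA num = pvTerm num := by
  rw [pvTerm_def]
  unfold pvFA
  by_cases h0 : num = 0
  · rw [if_neg (by omega : ¬ num ≠ 0), if_pos (Or.inl h0)]
  · by_cases hneg : num < 0
    · rw [if_pos h0, if_neg (by omega : ¬ num > 0), variable_mapping_get, if_pos hneg]
      by_cases hr : 1 ≤ -num ∧ -num ≤ 17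
      · rw [if_pos hr, if_neg (by omega : ¬ (num = 0 ∨ -num > 17)), Option.map_some,
          ← String.append_assoc, if_pos hneg]
        rfl
      · rw [if_neg hr, if_pos (by omega : num = 0 ∨ -num > 17), Option.map_none]
    · rw [if_pos h0, if_pos (by omega : num > 0), variable_mapping_get, if_neg hneg]
      by_cases hr : 1 ≤ num ∧ num ≤ 17
      · rw [if_pos hr, if_neg (by omega : ¬ (num = 0 ∨ num > 17)), if_neg hneg]
      · rw [if_neg hr, if_pos (by omega : num = 0 ∨ num > 17)]

-- A's loop body appends its optional contribution.
theorem stepA_eq :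
    (fun (acc : List String) (token : String) =>
      let num := (PySem.Int.ofStr? token).getD 0
      if num ≠ 0 then
        if num > 0 then
          match variable_mapping.get? num with
          | some var_name => acc ++ [var_name]
          | none => acc
        else
          match variable_mapping.get? (-num) with
          | some var_name => acc ++ ["!" ++ var_name]
          | none => acc
      else acc) =
    (fun (acc : List String) (token : String) =>
      acc ++ (pvFA ((PySem.Int.ofStr? token).getD 0)).toList) := by
  funext acc token
  show (if ((PySem.Int.ofStr? token).getD 0) ≠ 0 then
      if ((PySem.Int.ofStr? token).getD 0) > 0 then
        match variable_mapping.get? ((PySem.Int.ofStr? token).getD 0) with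
        | some var_name => acc ++ [var_name]
        | none => acc
      else
        match variable_mapping.get? (-((PySem.Int.ofStr? token).getD 0)) with
        | some var_name => acc ++ ["!" ++ var_name]
        | none => acc
    else acc) = acc ++ (pvFA ((PySem.Int.ofStr? token).getD 0)).toList
  set num := (PySem.Int.ofStr? token).getD 0 with hnum
  unfold pvFA
  by_cases h0 : num ≠ 0
  · rw [if_pos h0, if_pos h0]
    by_cases hp : num > 0
    · rw [if_pos hp, if_pos hp]
      cases variable_mapping.get? num <;> simp [Option.toList]
    · rw [if_neg hp, if_neg hp]
      cases variable_mapping.get? (-num) <;> simp [Option.toList]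
  · rw [if_neg h0, if_neg h0]
    simp [Option.toList]

-- Folding "append the optional contribution" is a filterMap.
theorem foldl_append_toList {α β : Type} (f : α → Option β) (l : List α) (acc : List β) :
    l.foldl (fun acc x => acc ++ (f x).toList) acc = acc ++ l.filterMap f := by
  induction l generalizing acc with
  | nil => simp
  | cons x xs ih =>
    rw [List.foldl_cons, ih, List.filterMap_cons]
    cases f x <;> simp [Option.toList]

-- Every string pvTerm produces is nonempty.
theorem pvTerm_ne_empty (num : Int) (s : String) (h : pvTerm num = some s) : s ≠ "" := by
  intro hs
  rw [pvTerm_def, hs] at h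
  split_ifs at h
  all_goals first
    | exact Option.noConfusion h
    | (have hlen := congrArg String.length (Option.some_inj.mp h)
       rw [String.length_append] at hlen
       simp only [show ("!x" : String).length = 2 from rfl, show ("x" : String).length = 1 from rfl,
         show ("" : String).length = 0 from rfl] at hlen
       omega)

-- Joining nonempty strings yields "" only on the empty list.
theorem join_eq_empty_iff (l : List String) (h : ∀ s ∈ l, s ≠ "") :
    (PySem.Str.join " && " l = "") ↔ l = [] := by
  cases l with
  | nil => exact iff_of_true rfl rfl
  | cons a tl =>
    apply iff_of_false _ (by simp)
    intro hj
    have ha : a.toList ≠ [] := fun hn => h a List.mem_cons_self (String.toList_eq_nil_iff.mp hn)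
    have hta := congrArg String.toList hj
    rw [PySem.Str.toList_join] at hta
    cases tl with
    | nil =>
      rw [List.map_cons, List.map_nil, PySem.Chars.join_singleton] at hta
      exact ha hta
    | cons b tl' =>
      rw [List.map_cons, List.map_cons, PySem.Chars.join_cons_cons] at hta
      simp at hta

-- B's recursion computes the join of the filterMap of pvTerm.
theorem pvGo_eq_join (tokens : List String) :
    pvGo tokens = PySem.Str.join " && "
      (tokens.filterMap (fun t => pvTerm ((PySem.Int.ofStr? t).getD 0))) := by
  induction tokens with
  | nil => rfl
  | cons t tl ih =>
    show (match pvTerm ((PySem.Int.ofStr? t).getD 0) with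
      | none => pvGo tl
      | some h => if pvGo tl = "" then h else h ++ " && " ++ pvGo tl) = _
    rw [List.filterMap_cons]
    cases hh : pvTerm ((PySem.Int.ofStr? t).getD 0) with
    | none => simpa using ih
    | some hd =>
      simp only [ih]
      have hne : ∀ s ∈ tl.filterMap (fun t => pvTerm ((PySem.Int.ofStr? t).getD 0)), s ≠ "" := by
        intro s hs
        obtain ⟨u, _, hu⟩ := List.mem_filterMap.mp hs
        exact pvTerm_ne_empty _ _ hu
      by_cases he : PySem.Str.join " && "
          (tl.filterMap (fun t => pvTerm ((PySem.Int.ofStr? t).getD 0))) = ""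
      · rw [if_pos he, (join_eq_empty_iff _ hne).mp he]
        apply String.toList_inj.mp
        rw [PySem.Str.toList_join, List.map_cons, List.map_nil, PySem.Chars.join_singleton]
      · rw [if_neg he]
        cases hc : tl.filterMap (fun t => pvTerm ((PySem.Int.ofStr? t).getD 0)) with
        | nil => exact absurd ((join_eq_empty_iff _ hne).mpr hc) he
        | cons b tl' =>
          apply String.toList_inj.mp
          simp [PySem.Str.toList_join, PySem.Chars.join_cons_cons, String.toList_append]

-- ===== VERDICT (by name: the statement is the Claim_ definition above) =====
theorem convert_sample_spec : Claim_equal_convert_sample := by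
  intro sample_line _ _
  show convert_sample sample_line = convert_sample_alt sample_line
  have hA : convert_sample sample_line = PySem.Str.join " && "
      ((PySem.Str.split₀ sample_line).foldl (fun acc token =>
        let num := (PySem.Int.ofStr? token).getD 0
        if num ≠ 0 then
          if num > 0 then
            match variable_mapping.get? num with
            | some var_name => acc ++ [var_name]
            | none => acc
          else
            match variable_mapping.get? (-num) with
            | some var_name => acc ++ ["!" ++ var_name]
            | none => acc
        else acc) []) := rfl
  have hB : convert_sample_alt sample_line = pvGo (PySem.Str.split₀ sample_line) := rfl
  rw [hA, hB, stepA_eq, foldl_append_toList, List.nil_append, pvGo_eq_join]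
  congr 1
  exact List.filterMap_congr (fun t _ => pvFA_eq_term _)
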